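-- pv_equiv track=rewrite | github.com/JorisMonnet/DM_Assignment3 | src/task_c3.py | filter_subpatterns
-- ===== SOURCE A (Python) =====
-- def filter_subpatterns(repeated_patterns):
--     """
--     Filter out subpatterns from a dictionary of repeated patterns.
--     """
--     patterns = list(repeated_patterns.keys())
--     filtered_patterns = set(patterns)
--
--     for i, pattern1 in enumerate(patterns):
--         for pattern2 in patterns[i+1:]:
--             if len(pattern1) < len(pattern2):
--                 if any(pattern1 == pattern2[j:j+len(pattern1)] for j in range(len(pattern2) - len(pattern1) + 1)):
--                     filtered_patterns.discard(pattern1)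
--                     break
--
--     return {pattern: repeated_patterns[pattern] for pattern in filtered_patterns}
-- ===== SOURCE B (Python) =====
-- def filter_subpatterns(repeated_patterns):
--     """
--     Substring-index approach: sweep the keys right-to-left while maintaining a
--     hash set of ALL substrings of the patterns already seen (the later ones).
--     A pattern is kept iff it is not in that set: since dict keys are distinct,
--     membership is exactly "proper substring of some later, longer pattern".
--     """
--     subs = set()
--     kept = []
--     for p in reversed(list(repeated_patterns)):
--         if p not in subs:
--             kept.append(p)
--         for i in range(len(p)):
--             for j in range(i, len(p) + 1):
--                 subs.add(p[i:j])
--     return {p: repeated_patterns[p] for p in reversed(kept)}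
-- ===== Notes on version B (the rewrite author's own statement) =====
-- stated objective: faster
-- what changed: Replaces A's pairwise enumerate/slice double loop over pattern pairs by a single right-to-left sweep that maintains a hash set of all substrings of the patterns already passed, so each pattern is tested with one O(1)-expected set lookup instead of an inner scan over all later patterns.
import Mathlib
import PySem

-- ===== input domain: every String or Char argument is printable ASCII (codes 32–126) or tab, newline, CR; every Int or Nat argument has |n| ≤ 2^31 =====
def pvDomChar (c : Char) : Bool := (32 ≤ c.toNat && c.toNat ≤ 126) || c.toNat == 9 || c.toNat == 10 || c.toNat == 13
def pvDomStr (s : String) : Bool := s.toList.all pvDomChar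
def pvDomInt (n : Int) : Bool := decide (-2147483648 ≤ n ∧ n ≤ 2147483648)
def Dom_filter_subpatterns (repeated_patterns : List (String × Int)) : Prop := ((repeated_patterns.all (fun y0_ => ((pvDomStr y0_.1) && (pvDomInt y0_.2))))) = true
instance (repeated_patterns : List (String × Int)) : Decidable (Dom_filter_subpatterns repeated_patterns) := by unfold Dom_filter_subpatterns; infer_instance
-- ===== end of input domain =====

-- B replaces A's pairwise double loop over pattern pairs by one right-to-left sweep that
-- maintains a set of ALL substrings of the patterns already passed and tests each pattern
-- by a single set-membership lookup (objective: faster, O(n·L²) vs O(n²·L²)).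
-- A returns a dict built by iterating a Python set (hash order); dict outputs are compared
-- ignoring order, and both ports emit the kept keys in original insertion order.

-- ===== PORT A =====
-- any(pattern1 == pattern2[j:j+len(pattern1)] for j in range(len(pattern2) - len(pattern1) + 1))
def pvWindowA (p1 p2 : String) : Bool :=
  (PySem.List.pyRange 0 (PySem.Str.len p2 - PySem.Str.len p1 + 1) 1).any
    (fun j => p1 == PySem.Str.slice p2 (some j) (some (j + PySem.Str.len p1)))

-- inner loop "for pattern2 in patterns[i+1:]" with its break
def pvInnerA (p1 : String) : List String → Bool
  | [] => false
  | p2 :: rest =>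
    if PySem.Str.len p1 < PySem.Str.len p2 then
      if pvWindowA p1 p2 then true else pvInnerA p1 rest
    else pvInnerA p1 rest

-- outer loop "for i, pattern1 in enumerate(patterns)"; the slice patterns[i+1:] is the tail after pattern1
def pvOuterA : List String → PySem.Set String → PySem.Set String
  | [], s => s
  | p1 :: rest, s =>
    pvOuterA rest (if pvInnerA p1 rest then PySem.Set.discard s p1 else s)

def filter_subpatterns (repeated_patterns : List (String × Int)) : List (String × Int) :=
  let d := PySem.Dict.ofList repeated_patterns
  let patterns := d.keys
  let filtered := pvOuterA patterns (PySem.Set.ofList patterns)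
  filtered.map (fun p => (p, d.getD p 0))

-- ===== PORT B =====
-- "for i in range(len(p)): for j in range(i, len(p) + 1): subs.add(p[i:j])"
def pvAddSubs (s : PySem.Set String) (p : String) : PySem.Set String :=
  (PySem.List.pyRange 0 (PySem.Str.len p) 1).foldl (fun s i =>
    (PySem.List.pyRange i (PySem.Str.len p + 1) 1).foldl (fun s j =>
      PySem.Set.add s (PySem.Str.slice p (some i) (some j))) s) s

def filter_subpatterns_alt (repeated_patterns : List (String × Int)) : List (String × Int) :=
  let d := PySem.Dict.ofList repeated_patterns
  let res := (d.keys.reverse).foldl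
    (fun (acc : List String × PySem.Set String) (p : String) =>
      ((if acc.2.contains p then acc.1 else acc.1 ++ [p]), pvAddSubs acc.2 p))
    ([], PySem.Set.empty)
  res.1.reverse.map (fun p => (p, d.getD p 0))

-- ===== PRECONDITION & SPEC =====
def Spec_filter_subpatterns (repeated_patterns : List (String × Int)) (out : List (String × Int)) : Prop := out = filter_subpatterns_alt repeated_patterns
instance (repeated_patterns : List (String × Int)) (out : List (String × Int)) : Decidable (Spec_filter_subpatterns repeated_patterns out) := by unfold Spec_filter_subpatterns; infer_instance

-- ===== CLAIM (what is proved, stated in full; the proofs are below) =====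
def Claim_equal_filter_subpatterns : Prop := ∀ (repeated_patterns : List (String × Int)), Dom_filter_subpatterns repeated_patterns → Spec_filter_subpatterns repeated_patterns (filter_subpatterns repeated_patterns)

-- ===== LEMMAS AND PROOFS =====

-- the containment condition A tests pairwise
def pvCond (p q : String) : Bool :=
  decide (PySem.Str.len p < PySem.Str.len q) && PySem.Str.isIn p q

-- A's window scan is the substring test (when p is strictly shorter than q)
lemma pvWindowA_eq_isIn (p q : String) (h : p.toList.length < q.toList.length) :
    pvWindowA p q = PySem.Str.isIn p q := by
  have hslice : ∀ j : Int, 0 ≤ j →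
      (PySem.Str.slice q (some j) (some (j + PySem.Str.len p))).toList
        = (q.toList.drop j.toNat).take p.toList.length := by
    intro j hj0
    rw [PySem.Str.toList_slice, PySem.Chars.slice_eq_listSlice,
      PySem.List.slice_toNat _ hj0 (by unfold PySem.Str.len; omega)]
    congr 1
    unfold PySem.Str.len
    omega
  rw [Bool.eq_iff_iff]
  unfold pvWindowA
  rw [List.any_eq_true, PySem.Str.isIn, ← PySem.Chars.exists_prefix_drop_iff_isIn]
  constructor
  · rintro ⟨j, hj, hpred⟩
    rw [PySem.List.mem_pyRange_one] at hj
    have hps : p = PySem.Str.slice q (some j) (some (j + PySem.Str.len p)) := by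
      simpa [beq_iff_eq] using hpred
    refine ⟨j.toNat, List.prefix_iff_eq_take.mpr ?_⟩
    calc p.toList = (PySem.Str.slice q (some j) (some (j + PySem.Str.len p))).toList := by rw [← hps]
      _ = (q.toList.drop j.toNat).take p.toList.length := hslice j hj.1
  · rintro ⟨j, hpre⟩
    have hlen : p.toList.length ≤ q.toList.length - j := by
      have := hpre.length_le
      simpa using this
    set la := p.toList.length with hla
    set lb := q.toList.length with hlb
    have hcase : j ≤ lb - la ∨ la = 0 := by omega
    set n : Nat := min j (lb - la) with hn
    have heq : p.toList = (q.toList.drop n).take la := by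
      rcases hcase with hc | hc
      · have : n = j := by omega
        rw [this]
        exact List.prefix_iff_eq_take.mp hpre
      · have hnil : p.toList = [] := List.length_eq_zero_iff.mp hc
        rw [hnil, hc, List.take_zero]
    refine ⟨(n : Int), ?_, ?_⟩
    · rw [PySem.List.mem_pyRange_one]
      unfold PySem.Str.len
      constructor
      · omega
      · have : n ≤ lb - la := by omega
        omega
    · have : p = PySem.Str.slice q (some (n : Int)) (some ((n : Int) + PySem.Str.len p)) := by
        apply String.toList_inj.mp
        rw [hslice _ (by omega)]
        simpa using heq
      simp only [beq_iff_eq]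
      exact this

lemma pvInnerA_eq_any (p : String) (l : List String) :
    pvInnerA p l = l.any (pvCond p) := by
  induction l with
  | nil => rfl
  | cons q t ih =>
    simp only [pvInnerA, List.any_cons, pvCond, ih]
    by_cases hlt : PySem.Str.len p < PySem.Str.len q
    · have hlt' : p.toList.length < q.toList.length := by
        unfold PySem.Str.len at hlt; omega
      have hL : p.length < q.length := by
        rw [← String.length_toList (s := p), ← String.length_toList (s := q)]; exact hlt'
      rw [if_pos hlt, pvWindowA_eq_isIn p q hlt']
      unfold PySem.Str.isIn
      by_cases hin : PySem.Chars.isIn p.toList q.toList = true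
      · simp [hin, hL]
      · simp only [Bool.not_eq_true] at hin
        simp [hin]
    · have hL : ¬ p.length < q.length := by
        unfold PySem.Str.len at hlt
        rw [← String.length_toList (s := p), ← String.length_toList (s := q)]
        omega
      rw [if_neg hlt]
      simp [hL]

-- the discarded patterns, in order
def pvD : List String → List String
  | [] => []
  | p :: t => if t.any (pvCond p) then p :: pvD t else pvD t

lemma pvD_subset (ps : List String) : ∀ x ∈ pvD ps, x ∈ ps := by
  induction ps with
  | nil => simp [pvD]
  | cons p t ih =>
    intro x hx
    by_cases h : t.any (pvCond p) <;> simp [pvD, h] at hx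
    · rcases hx with hx | hx
      · simp [hx]
      · exact List.mem_cons_of_mem _ (ih x hx)
    · exact List.mem_cons_of_mem _ (ih x hx)

lemma pvOuterA_eq_filter (ps : List String) : ∀ s : PySem.Set String,
    pvOuterA ps s = s.filter (fun x => !(pvD ps).contains x) := by
  induction ps with
  | nil => intro s; simp [pvOuterA, pvD]
  | cons p t ih =>
    intro s
    by_cases h : t.any (pvCond p)
    · simp only [pvOuterA, pvInnerA_eq_any, h, if_pos, pvD, ih, PySem.Set.discard,
        List.filter_filter]
      apply List.filter_congr
      intro x _
      by_cases hxp : x = p <;> simp [hxp]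
    · simp only [pvOuterA, pvInnerA_eq_any, h, pvD, ih]
      simp

-- the common specification both ports compute
def pvSpecList (d : PySem.Dict String Int) : List String → List (String × Int)
  | [] => []
  | p :: t => if t.any (pvCond p) then pvSpecList d t else (p, d.getD p 0) :: pvSpecList d t

lemma filter_eq_spec (d : PySem.Dict String Int) (ps : List String) (hnd : ps.Nodup) :
    (ps.filter (fun x => !(pvD ps).contains x)).map (fun p => (p, d.getD p 0)) =
      pvSpecList d ps := by
  induction ps with
  | nil => rfl
  | cons p t ih =>
    have hpt : p ∉ t := (List.nodup_cons.mp hnd).1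
    have hnd' : t.Nodup := (List.nodup_cons.mp hnd).2
    by_cases h : t.any (pvCond p)
    · simp only [pvSpecList, h, if_pos]
      rw [← ih hnd']
      simp only [pvD, h, if_pos, List.filter_cons]
      have hp : (!(p :: pvD t).contains p) = false := by simp
      rw [hp]
      simp only [Bool.false_eq_true, if_false]
      congr 1
      apply List.filter_congr
      intro x hx
      have hxp : x ≠ p := fun he => hpt (he ▸ hx)
      simp [hxp]
    · simp only [pvSpecList, h, Bool.false_eq_true]
      rw [← ih hnd']
      simp only [pvD, h, Bool.false_eq_true, if_false, List.filter_cons]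
      have hp : (!(pvD t).contains p) = true := by
        simp only [Bool.not_eq_eq_eq_not, Bool.not_true, List.contains_eq_mem, decide_eq_false_iff_not]
        exact fun hmem => hpt (pvD_subset t p hmem)
      rw [hp]
      simp

-- ===== B-side lemmas =====

-- membership after adding all substrings of p
lemma mem_pvAddSubs (p : String) (s : PySem.Set String) (x : String) :
    x ∈ pvAddSubs s p ↔ x ∈ s ∨ (p.toList ≠ [] ∧ x.toList <:+: p.toList) := by
  have houter : ∀ (l : List Int) (s : PySem.Set String),
      x ∈ l.foldl (fun s i =>
        (PySem.List.pyRange i (PySem.Str.len p + 1) 1).foldl (fun s j =>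
          PySem.Set.add s (PySem.Str.slice p (some i) (some j))) s) s
      ↔ x ∈ s ∨ ∃ i ∈ l, ∃ j ∈ PySem.List.pyRange i (PySem.Str.len p + 1) 1,
          x = PySem.Str.slice p (some i) (some j) := by
    intro l
    induction l with
    | nil => intro s; simp
    | cons i t ih =>
      intro s
      rw [List.foldl_cons, ih, PySem.Set.mem_foldl_add]
      constructor
      · rintro (⟨hs | ⟨j, hj, hx⟩⟩ | ⟨i', hi', j, hj, hx⟩)
        · exact Or.inl hs
        · exact Or.inr ⟨i, List.mem_cons_self, j, hj, hx⟩
        · exact Or.inr ⟨i', List.mem_cons_of_mem _ hi', j, hj, hx⟩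
      · rintro (hs | ⟨i', hi', j, hj, hx⟩)
        · exact Or.inl (Or.inl hs)
        · rcases List.mem_cons.mp hi' with he | hm
          · exact Or.inl (Or.inr ⟨j, he ▸ hj, he ▸ hx⟩)
          · exact Or.inr ⟨i', hm, j, hj, hx⟩
  have hslice : ∀ i j : Int, 0 ≤ i → i ≤ j →
      (PySem.Str.slice p (some i) (some j)).toList
        = (p.toList.drop i.toNat).take (j.toNat - i.toNat) := by
    intro i j hi hj
    rw [PySem.Str.toList_slice, PySem.Chars.slice_eq_listSlice,
      PySem.List.slice_toNat _ hi (by omega)]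
  unfold pvAddSubs
  rw [houter]
  apply or_congr Iff.rfl
  constructor
  · rintro ⟨i, hi, j, hj, hx⟩
    rw [PySem.List.mem_pyRange_one] at hi hj
    unfold PySem.Str.len at hi hj
    refine ⟨by intro hnil; rw [hnil] at hi; simp at hi; omega, ?_⟩
    have hxl : x.toList = (p.toList.drop i.toNat).take (j.toNat - i.toNat) := by
      rw [hx]; exact hslice i j hi.1 hj.1
    rw [hxl]
    exact (List.take_prefix _ _).isInfix.trans (List.drop_suffix i.toNat p.toList).isInfix
  · rintro ⟨hnil, hinf⟩
    have hL : 0 < p.toList.length := List.length_pos_iff.mpr hnil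
    have hdrop : ∃ n : Nat, x.toList <+: p.toList.drop n := by
      rw [PySem.Chars.exists_prefix_drop_iff_isIn, PySem.Chars.isIn_iff_infix]
      exact hinf
    rcases hdrop with ⟨n, hpre⟩
    by_cases hx0 : x.toList = []
    · refine ⟨0, ?_, 0, ?_, ?_⟩
      · rw [PySem.List.mem_pyRange_one]; unfold PySem.Str.len; omega
      · rw [PySem.List.mem_pyRange_one]; unfold PySem.Str.len; omega
      · apply String.toList_inj.mp
        rw [hslice 0 0 le_rfl le_rfl, hx0]
        simp
    · have hxL : 0 < x.toList.length := List.length_pos_iff.mpr hx0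
      have hle : x.toList.length ≤ p.toList.length - n := by
        have := hpre.length_le
        simpa using this
      have hn : n + x.toList.length ≤ p.toList.length := by omega
      refine ⟨(n : Int), ?_, ((n + x.toList.length : Nat) : Int), ?_, ?_⟩
      · rw [PySem.List.mem_pyRange_one]; unfold PySem.Str.len
        constructor
        · omega
        · omega
      · rw [PySem.List.mem_pyRange_one]; unfold PySem.Str.len
        constructor
        · push_cast; omega
        · push_cast; omega
      · apply String.toList_inj.mp
        rw [hslice _ _ (by omega) (by push_cast; omega)]
        have : ((n + x.toList.length : Nat) : Int).toNat - ((n : Int)).toNat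
            = x.toList.length := by omega
        rw [this]
        simp only [Int.toNat_natCast]
        exact List.prefix_iff_eq_take.mp hpre
  
-- B's per-pattern containment test
def pvSubB (p q : String) : Bool := decide (q.toList ≠ [] ∧ p.toList <:+: q.toList)

-- the kept keys of B's sweep, in original order
def pvKept : List String → List String
  | [] => []
  | p :: t => if t.any (pvSubB p) then pvKept t else p :: pvKept t

-- invariant of B's right-to-left fold
lemma pvFoldB_inv (ps : List String) :
    ∃ S : PySem.Set String,
      (ps.reverse.foldl
        (fun (acc : List String × PySem.Set String) (p : String) =>
          ((if acc.2.contains p then acc.1 else acc.1 ++ [p]), pvAddSubs acc.2 p))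
        ([], PySem.Set.empty)) = ((pvKept ps).reverse, S)
      ∧ ∀ x, x ∈ S ↔ ∃ q ∈ ps, q.toList ≠ [] ∧ x.toList <:+: q.toList := by
  induction ps with
  | nil => exact ⟨PySem.Set.empty, rfl, by simp [PySem.Set.empty]⟩
  | cons p t ih =>
    rcases ih with ⟨S, hfold, hmem⟩
    refine ⟨pvAddSubs S p, ?_, ?_⟩
    · rw [List.reverse_cons, List.foldl_append, hfold, List.foldl_cons, List.foldl_nil]
      have hc : S.contains p = t.any (pvSubB p) := by
        rw [Bool.eq_iff_iff, PySem.Set.contains_iff, hmem p, List.any_eq_true]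
        constructor
        · rintro ⟨q, hq, h1, h2⟩; exact ⟨q, hq, by simp [pvSubB, h1, h2]⟩
        · rintro ⟨q, hq, h⟩
          simp only [pvSubB, decide_eq_true_eq] at h
          exact ⟨q, hq, h⟩
      rw [hc]
      by_cases h : t.any (pvSubB p)
      · simp [pvKept, h]
      · simp [pvKept, h]
    · intro x
      rw [mem_pvAddSubs, hmem x]
      constructor
      · rintro (⟨q, hq, h⟩ | h)
        · exact ⟨q, List.mem_cons_of_mem _ hq, h⟩
        · exact ⟨p, List.mem_cons_self, h⟩
      · rintro ⟨q, hq, h⟩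
        rcases List.mem_cons.mp hq with he | hm
        · exact Or.inr (he ▸ h)
        · exact Or.inl ⟨q, hm, h⟩

-- B's condition agrees with A's on distinct patterns
lemma pvSubB_eq_pvCond (p q : String) (hne : p ≠ q) : pvSubB p q = pvCond p q := by
  rw [Bool.eq_iff_iff]
  simp only [pvSubB, pvCond, decide_eq_true_eq, Bool.and_eq_true, PySem.Str.isIn_iff_infix]
  unfold PySem.Str.len
  constructor
  · rintro ⟨hnil, hinf⟩
    refine ⟨?_, hinf⟩
    have hle := hinf.length_le
    rcases lt_or_eq_of_le hle with h | h
    · omega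
    · exact absurd (String.toList_inj.mp (hinf.eq_of_length h)) hne
  · rintro ⟨hlt, hinf⟩
    exact ⟨by intro hnil; rw [hnil] at hlt; simp at hlt; omega, hinf⟩

-- B's kept list, mapped to pairs, is the common spec (on duplicate-free keys)
lemma pvKept_map_eq_spec (d : PySem.Dict String Int) (ps : List String) (hnd : ps.Nodup) :
    (pvKept ps).map (fun p => (p, d.getD p 0)) = pvSpecList d ps := by
  induction ps with
  | nil => rfl
  | cons p t ih =>
    have hpt : p ∉ t := (List.nodup_cons.mp hnd).1
    have hnd' : t.Nodup := (List.nodup_cons.mp hnd).2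
    have hcond : t.any (pvSubB p) = t.any (pvCond p) := by
      rw [Bool.eq_iff_iff, List.any_eq_true, List.any_eq_true]
      constructor
      · rintro ⟨q, hq, h⟩
        exact ⟨q, hq, (pvSubB_eq_pvCond p q (fun he => hpt (he ▸ hq))) ▸ h⟩
      · rintro ⟨q, hq, h⟩
        exact ⟨q, hq, (pvSubB_eq_pvCond p q (fun he => hpt (he ▸ hq))).symm ▸ h⟩
    by_cases h : t.any (pvCond p)
    · simp only [pvKept, hcond, h, if_pos, pvSpecList, ih hnd']
    · simp only [pvKept, hcond, h, Bool.false_eq_true, if_false, pvSpecList, List.map_cons,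
        ih hnd']

-- ===== VERDICT (by name: the statement is the Claim_ definition above) =====
theorem filter_subpatterns_spec : Claim_equal_filter_subpatterns := by
  intro rp _
  unfold Spec_filter_subpatterns filter_subpatterns filter_subpatterns_alt
  simp only []
  set d := PySem.Dict.ofList rp with hd
  have hnd : d.keys.Nodup := PySem.Dict.nodup_keys_ofList rp
  rcases pvFoldB_inv d.keys with ⟨S, hfold, _⟩
  rw [hfold]
  simp only [List.reverse_reverse]
  rw [PySem.Set.ofList_eq_self_of_nodup _ hnd, pvOuterA_eq_filter, filter_eq_spec d _ hnd,
    pvKept_map_eq_spec d _ hnd]
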